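-- pv_equiv track=rewrite | github.com/huzecong/nnlib | nnlib/utils/ner.py | bio2bieso
-- ===== SOURCE A (Python) =====
-- def bio2bieso(tags):
--     new_tags = []
--     pos = -1
--     for i, tag in enumerate(tags):
--         if tag[0] == 'B':
--             pos = i
--         elif tag[0] == 'O':
--             pos = -1
--             new_tags.append('O')
--         if ((i == len(tags) - 1) or (tags[i + 1][0] != 'I')) and (pos != -1):
--             typ = tags[pos][1:]
--             if pos == i:
--                 new_tags.append('S' + typ)
--             else:
--                 new_tags.append('B' + typ)
--                 new_tags.extend(['I' + typ] * (i - pos - 1))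
--                 new_tags.append('E' + typ)
--     return new_tags
-- ===== SOURCE B (Python) =====
-- def bio2bieso(tags):
--     n = len(tags)
--     out = []
--     i = 0
--     while i < n:
--         c = tags[i][0]
--         if c == 'O':
--             out.append('O')
--             i += 1
--         elif c == 'B':
--             typ = tags[i][1:]
--             j = i + 1
--             while j < n and tags[j][0] == 'I':
--                 j += 1
--             if j - i == 1:
--                 out.append('S' + typ)
--             else:
--                 out.append('B' + typ)
--                 out.extend(['I' + typ] * (j - i - 2))
--                 out.append('E' + typ)
--             i = j
--         else:
--             i += 1
--     return out
-- ===== Notes on version B (the rewrite author's own statement) =====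
-- stated objective: alternative
-- what changed: Replaced A's enumerate fold with a pos register and per-index lookahead by an index-driven while-loop segmentation: on 'B' an inner scan consumes the following run of 'I' tags and exactly one S or B..I..E span is emitted for it, on 'O' an 'O' is emitted, and any other tag is skipped; Pre_ excludes inputs containing an empty-string tag, where both A and B raise IndexError on tag[0].
-- intended difference: On inputs where a tag whose head is none of 'B'/'I'/'O' occurs after a 'B' tag with no 'O' tag in between, A's stale pos register emits extra overlapping spans covering the stray tag (e.g. ['B-P','X'] -> ['S-P','B-P','E-P']), while B emits one span per B..I run and drops the stray tag (['S-P']), which is the intended BIESO conversion. — e.g. on bio2bieso(["B-P", "X"]): A returns ["S-P", "B-P", "E-P"], B returns ["S-P"]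
import Mathlib
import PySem

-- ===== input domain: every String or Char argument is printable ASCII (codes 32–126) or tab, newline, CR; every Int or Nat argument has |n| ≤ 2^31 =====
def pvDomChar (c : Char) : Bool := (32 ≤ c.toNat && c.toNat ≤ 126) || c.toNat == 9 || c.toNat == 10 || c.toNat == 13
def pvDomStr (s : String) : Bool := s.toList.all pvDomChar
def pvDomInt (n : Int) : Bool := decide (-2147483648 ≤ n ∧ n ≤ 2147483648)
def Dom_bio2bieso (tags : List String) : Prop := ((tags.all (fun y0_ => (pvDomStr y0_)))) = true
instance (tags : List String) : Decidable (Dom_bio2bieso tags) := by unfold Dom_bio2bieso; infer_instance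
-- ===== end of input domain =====

-- B replaces A's pos-register state machine by an index-driven while-loop that consumes each
-- B-headed run (B followed by I's) with an inner scan and emits exactly one S or B..I..E span
-- for it; A and B agree outside D_ (inputs where a tag with an unrecognised head occurs while
-- A's pos register is still open), where A emits extra overlapping spans and B does not.

-- total read of tags[i] (default ""); under Pre_ every tag read is an existing nonempty string
def tg (tags : List String) (i : Nat) : String := (tags[i]?).getD ""

-- tag[0] as a total function; under Pre_ every tag is nonempty so the default is never read.
def headC (s : String) : Char := (PySem.Str.pyGet? s 0).getD '?'

-- ===== PORT A =====

-- Python's short-circuit `(i == len(tags)-1) or (tags[i+1][0] != 'I')`: when i = len-1 the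
-- left disjunct is true and tags[i+1] is never read, so reading a "" default there is exact.
def lookNotI (tags : List String) (i : Nat) : Bool :=
  (i + 1 == tags.length) || (headC (tg tags (i+1)) != 'I')

-- the span A appends when it closes the run pos..i (typ = tags[pos][1:])
def spanA (tags : List String) (pos : Int) (i : Nat) : List String :=
  let typ := PySem.Str.slice (PySem.List.pyGetD tags pos "") (some 1) none
  if pos = (i : Int) then ["S" ++ typ]
  else ["B" ++ typ] ++ List.replicate ((i : Int) - pos - 1).toNat ("I" ++ typ) ++ ["E" ++ typ]

-- the body of `for i, tag in enumerate(tags)`, as recursion on the index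
def aLoop (tags : List String) (i : Nat) (pos : Int) (acc : List String) : List String :=
  if h : i < tags.length then
    let tag := tags[i]
    let st : List String × Int :=
      if headC tag = 'B' then (acc, (i : Int))
      else if headC tag = 'O' then (acc ++ ["O"], -1)
      else (acc, pos)
    let acc2 : List String :=
      if lookNotI tags i ∧ st.2 ≠ -1 then st.1 ++ spanA tags st.2 i else st.1
    aLoop tags (i+1) st.2 acc2
  else acc
termination_by tags.length - i

def bio2bieso (tags : List String) : List String := aLoop tags 0 (-1) []

-- ===== PORT B =====

-- inner `while j < n and tags[j][0] == 'I'` loop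
def scanI (tags : List String) (j : Nat) : Nat :=
  if h : j < tags.length then
    if headC tags[j] = 'I' then scanI tags (j+1) else j
  else j
termination_by tags.length - j

theorem scanI_ge (tags : List String) (j : Nat) : j ≤ scanI tags j := by
  unfold scanI
  split
  · split
    · exact le_trans (Nat.le_succ j) (scanI_ge tags (j+1))
    · exact le_refl j
  · exact le_refl j
termination_by tags.length - j

-- the outer while loop of B
def bLoop (tags : List String) (i : Nat) (acc : List String) : List String :=
  if h : i < tags.length then
    let c := headC tags[i]
    if c = 'O' then bLoop tags (i+1) (acc ++ ["O"])
    else if c = 'B' then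
      let typ := PySem.Str.slice tags[i] (some 1) none
      let j := scanI tags (i+1)
      let span := if j - i = 1 then ["S" ++ typ]
        else ["B" ++ typ] ++ List.replicate (j - i - 2) ("I" ++ typ) ++ ["E" ++ typ]
      bLoop tags j (acc ++ span)
    else bLoop tags (i+1) acc
  else acc
termination_by tags.length - i
decreasing_by
  · omega
  · have := scanI_ge tags (i+1); omega
  · omega

def bio2bieso_alt (tags : List String) : List String := bLoop tags 0 []

-- ===== PRECONDITION & SPEC =====
-- Pre_ excludes exactly the inputs containing an empty-string tag: Python A raises
-- IndexError on tag[0] there (and so does B).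
def Pre_bio2bieso (tags : List String) : Prop := ∀ s ∈ tags, s ≠ ""
instance (tags : List String) : Decidable (Pre_bio2bieso tags) := by unfold Pre_bio2bieso; infer_instance

def pvWitness_bio2bieso : List String := ["B-PER", "I-PER", "O", "B-LOC", "I-X"]

-- On inputs where a tag whose head is none of 'B'/'I'/'O' appears after a 'B' tag with no 'O'
-- tag in between, A's stale pos register makes it emit extra overlapping spans covering the
-- stray tag, while B emits one span per B..I run and skips stray tags, which is the intended
-- BIESO conversion.
def D_bio2bieso (tags : List String) : Prop :=
  ∃ k < tags.length,
    (headC (tg tags k) ≠ 'B' ∧ headC (tg tags k) ≠ 'I' ∧ headC (tg tags k) ≠ 'O') ∧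
    ∃ p < k, headC (tg tags p) = 'B' ∧ ∀ m < k, p < m → headC (tg tags m) ≠ 'O'
instance (tags : List String) : Decidable (D_bio2bieso tags) := by unfold D_bio2bieso; infer_instance

def Spec_bio2bieso (tags : List String) (out : List String) : Prop :=
  ¬ D_bio2bieso tags → out = bio2bieso_alt tags
instance (tags : List String) (out : List String) : Decidable (Spec_bio2bieso tags out) := by unfold Spec_bio2bieso; infer_instance

def pvDiffWitness_bio2bieso : List String := ["B-P", "X"]
def pvDiffWitnessOut_bio2bieso : (List String) × (List String) :=
  (["S-P", "B-P", "E-P"], ["S-P"])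

-- ===== CLAIM (what is proved, stated in full; the proofs are below) =====
def Claim_unchanged_bio2bieso : Prop := ∀ (tags : List String), Dom_bio2bieso tags → Pre_bio2bieso tags → Spec_bio2bieso tags (bio2bieso tags)
def Claim_changed_bio2bieso : Prop := Dom_bio2bieso (pvDiffWitness_bio2bieso) ∧ Pre_bio2bieso (pvDiffWitness_bio2bieso) ∧ D_bio2bieso (pvDiffWitness_bio2bieso) ∧ bio2bieso (pvDiffWitness_bio2bieso) = pvDiffWitnessOut_bio2bieso.1 ∧ bio2bieso_alt (pvDiffWitness_bio2bieso) = pvDiffWitnessOut_bio2bieso.2 ∧ pvDiffWitnessOut_bio2bieso.1 ≠ pvDiffWitnessOut_bio2bieso.2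

-- ===== LEMMAS AND PROOFS =====

theorem tg_eq (tags : List String) (i : Nat) (h : i < tags.length) : tg tags i = tags[i] := by
  simp [tg, List.getElem?_eq_getElem h]

theorem scanI_le (tags : List String) (j : Nat) (hj : j ≤ tags.length) :
    scanI tags j ≤ tags.length := by
  rw [scanI]
  split
  · split
    · exact scanI_le tags (j+1) (by omega)
    · omega
  · omega
termination_by tags.length - j

theorem scanI_stop (tags : List String) (j : Nat) (hj : j ≤ tags.length) :
    scanI tags j = tags.length ∨ headC (tg tags (scanI tags j)) ≠ 'I' := by
  rw [scanI]
  split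
  · rename_i h
    split
    · exact scanI_stop tags (j+1) (by omega)
    · rename_i hc
      right
      rwa [tg_eq tags j h]
  · rename_i h
    left; omega
termination_by tags.length - j

theorem scanI_region (tags : List String) (j m : Nat) (h1 : j ≤ m) (h2 : m < scanI tags j) :
    headC (tg tags m) = 'I' := by
  rw [scanI] at h2
  split at h2
  · rename_i h
    split at h2
    · rename_i hc
      rcases Nat.eq_or_lt_of_le h1 with heq | hlt
      · subst heq; rwa [tg_eq _ _ h]
      · exact scanI_region tags (j+1) m hlt h2
    · omega
  · omega
termination_by tags.length - j

-- under ¬D_, the scan after a B tag stops at the end or at a B/O tag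
theorem notD_stop (tags : List String) (hD : ¬ D_bio2bieso tags) (p : Nat)
    (hp : p < tags.length) (hB : headC (tg tags p) = 'B') :
    tags.length ≤ scanI tags (p+1) ∨
      (headC (tg tags (scanI tags (p+1))) = 'B' ∨ headC (tg tags (scanI tags (p+1))) = 'O') := by
  set j := scanI tags (p+1) with hj
  rcases scanI_stop tags (p+1) (by omega) with heq | hne
  · left; omega
  · by_cases hjn : j < tags.length
    · right
      by_contra hBO
      rw [not_or] at hBO
      apply hD
      refine ⟨j, hjn, ⟨hBO.1, hne, hBO.2⟩, p, ?_, hB, ?_⟩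
      · have := scanI_ge tags (p+1); omega
      · intro m hm hpm
        have : headC (tg tags m) = 'I' := scanI_region tags (p+1) m (by omega) hm
        simp [this]
    · left; omega

-- A's span at pos = i, end j-1, equals B's single span for the run i..j
theorem spanA_eq (tags : List String) (i j : Nat) (hi : i < tags.length) (hij : i + 1 ≤ j) :
    spanA tags (i : Int) (j - 1) =
      (if j - i = 1 then ["S" ++ PySem.Str.slice tags[i] (some 1) none]
       else ["B" ++ PySem.Str.slice tags[i] (some 1) none]
            ++ List.replicate (j - i - 2) ("I" ++ PySem.Str.slice tags[i] (some 1) none)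
            ++ ["E" ++ PySem.Str.slice tags[i] (some 1) none]) := by
  unfold spanA
  have htyp : PySem.List.pyGetD tags (i : Int) "" = tags[i] := by
    rw [PySem.List.pyGetD_natCast]
    exact List.getD_eq_getElem tags "" hi
  by_cases h1 : j = i + 1
  · subst h1
    simp [htyp]
  · have hji : ¬ ((i : Int) = ((j - 1 : Nat) : Int)) := by omega
    have hji2 : ¬ (j - i = 1) := by omega
    simp only [hji, hji2, if_false, htyp]
    have h3 : (((j - 1 : Nat) : Int) - (i : Int) - 1).toNat = j - i - 2 := by omega
    rw [h3]

-- walking A's loop through the interior of a run i..j (all 'I' tags): exactly one span is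
-- emitted, at index j-1
theorem regionI (tags : List String) (p j : Nat) (hjn : j ≤ tags.length)
    (hreg : ∀ m, p < m → m < j → headC (tg tags m) = 'I')
    (hstop : j = tags.length ∨ headC (tg tags j) ≠ 'I') :
    ∀ k acc, p < k → k < j →
      aLoop tags k (p : Int) acc = aLoop tags j (p : Int) (acc ++ spanA tags (p : Int) (j - 1)) := by
  intro k acc hpk hkj
  have hkn : k < tags.length := by omega
  have hI : headC (tg tags k) = 'I' := hreg k hpk hkj
  rw [tg_eq tags k hkn] at hI
  rw [aLoop]
  simp only [dif_pos hkn, hI,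
    if_neg (show ¬ (('I' : Char) = 'B') by decide), if_neg (show ¬ (('I' : Char) = 'O') by decide)]
  have hpos : ((p : Int) ≠ -1) := by omega
  by_cases hlast : k = j - 1
  · have hkj1 : k + 1 = j := by omega
    have hlook : lookNotI tags k = true := by
      unfold lookNotI
      rcases hstop with heq | hne
      · have : k + 1 = tags.length := by omega
        simp [this]
      · rw [hkj1]
        simp [hne]
    simp only [if_pos (And.intro hlook hpos)]
    have e1 : spanA tags (p : Int) k = spanA tags (p : Int) (j - 1) := by rw [hlast]
    rw [e1, hkj1]
  · have hlook : lookNotI tags k = false := by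
      unfold lookNotI
      have h1 : k + 1 ≠ tags.length := by omega
      have h2 : headC (tg tags (k+1)) = 'I' := hreg (k+1) (by omega) (by omega)
      simp [h1, h2]
    simp only [hlook, Bool.false_eq_true, false_and, if_false]
    exact regionI tags p j hjn hreg hstop (k+1) acc (by omega) (by omega)
termination_by k => j - k

-- the main simulation: A's loop from index i with any pos equals B's loop from i, provided
-- pos is closed or the current tag re-sets it (which ¬D_ maintains)
theorem main_lemma (tags : List String) (hD : ¬ D_bio2bieso tags) :
    ∀ i pos acc,
      (pos = -1 ∨ tags.length ≤ i ∨ (headC (tg tags i) = 'B' ∨ headC (tg tags i) = 'O')) →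
      aLoop tags i pos acc = bLoop tags i acc := by
  intro i pos acc hC
  rw [aLoop, bLoop]
  by_cases h : i < tags.length
  · simp only [dif_pos h]
    by_cases hB : headC tags[i] = 'B'
    · -- B branch
      have hin : i + 1 ≤ tags.length := by omega
      have hji := scanI_ge tags (i+1)
      have hjn := scanI_le tags (i+1) hin
      have hstopD := notD_stop tags hD i h (by rwa [tg_eq tags i h])
      have hstopI := scanI_stop tags (i+1) hin
      set j := scanI tags (i+1) with hj
      have hreg : ∀ m, i < m → m < j → headC (tg tags m) = 'I' := by
        intro m hm1 hm2
        exact scanI_region tags (i+1) m (by omega) hm2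
      have hCj : ((i : Int)) = -1 ∨ tags.length ≤ j ∨
          (headC (tg tags j) = 'B' ∨ headC (tg tags j) = 'O') := by
        rcases hstopD with hle | hBO
        · right; left; exact hle
        · right; right; exact hBO
      simp only [hB, reduceIte]
      simp only [if_neg (show ¬ (('B' : Char) = 'O') by decide)]
      have hpos : ((i : Int) ≠ -1) := by omega
      by_cases h1 : j = i + 1
      · -- run of length one: A emits S at i itself
        have hlook : lookNotI tags i = true := by
          unfold lookNotI
          rw [← h1]
          rcases hstopI with heq | hne
          · simp [heq]
          · simp [hne]
        simp only [if_pos (And.intro hlook hpos)]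
        have hspan : spanA tags (i : Int) i = spanA tags (i : Int) (j - 1) := by
          rw [h1]
          simp
        rw [hspan, spanA_eq tags i j h (by omega), ← h1]
        exact main_lemma tags hD j (i : Int) _ hCj
      · -- longer run: no emission at i, interior walked by regionI
        have hj2 : i + 1 < j := by omega
        have hlook : lookNotI tags i = false := by
          unfold lookNotI
          have hne : i + 1 ≠ tags.length := by omega
          have hI : headC (tg tags (i+1)) = 'I' := hreg (i+1) (by omega) hj2
          simp [hne, hI]
        simp only [hlook, Bool.false_eq_true, false_and, if_false]
        have hstop2 : j = tags.length ∨ headC (tg tags j) ≠ 'I' := hstopI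
        rw [regionI tags i j hjn hreg hstop2 (i+1) acc (by omega) hj2]
        rw [spanA_eq tags i j h (by omega)]
        exact main_lemma tags hD j (i : Int) _ hCj
    · by_cases hO : headC tags[i] = 'O'
      · simp only [hO, if_neg (show ¬ ('O' = 'B') by decide), reduceIte]
        try simp only [if_neg (fun hh : lookNotI tags i = true ∧ ((-1 : Int)) ≠ -1 => hh.2 rfl)]
        exact main_lemma tags hD (i+1) (-1) (acc ++ ["O"]) (Or.inl rfl)
      · -- stray tag: the invariant forces pos = -1, nothing is emitted on either side
        have hpos : pos = -1 := by
          rcases hC with h' | h' | h'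
          · exact h'
          · omega
          · rw [tg_eq tags i h] at h'
            rcases h' with h' | h'
            · exact absurd h' hB
            · exact absurd h' hO
        subst hpos
        simp only [hB, hO, reduceIte]
        try simp only [if_neg (fun hh : lookNotI tags i = true ∧ ((-1 : Int)) ≠ -1 => hh.2 rfl)]
        exact main_lemma tags hD (i+1) (-1) acc (Or.inl rfl)
  · simp only [dif_neg h]
termination_by i => tags.length - i
decreasing_by
  · have := scanI_ge tags (i+1); omega
  · have := scanI_ge tags (i+1); omega
  · omega
  · omega

-- ===== VERDICT (by name: the statement is the Claim_ definition above) =====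
theorem bio2bieso_spec : Claim_unchanged_bio2bieso := by
  intro tags _ _ hD
  unfold bio2bieso bio2bieso_alt
  exact main_lemma tags hD 0 (-1) [] (Or.inl rfl)

theorem evalA_witness : bio2bieso pvDiffWitness_bio2bieso = ["S-P", "B-P", "E-P"] := by
  simp [bio2bieso, pvDiffWitness_bio2bieso, aLoop, lookNotI, spanA, headC, tg,
        PySem.Str.pyGet?, PySem.List.pyGetD, PySem.Str.slice]
  decide

theorem evalB_witness : bio2bieso_alt pvDiffWitness_bio2bieso = ["S-P"] := by
  simp [bio2bieso_alt, pvDiffWitness_bio2bieso, bLoop, scanI, headC,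
        PySem.Str.pyGet?, PySem.Str.slice]
  decide

theorem bio2bieso_changed : Claim_changed_bio2bieso := by
  unfold Claim_changed_bio2bieso
  exact ⟨by decide, by decide, by decide, evalA_witness, evalB_witness, by decide⟩
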